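-- pv_equiv track=rewrite | github.com/RiemanNClav/chatbot_cafeteria | chatbot/mensajes.py | generar_ticket_en_memoria
-- ===== SOURCE A (Python) =====
-- def generar_ticket_en_memoria(ticket_data, ticket_bebidas, total):
--     contenido = []
--
--     contenido.append("                  Tory Cafe")
--     contenido.append("   Poniente 128 #505, Col. Industrial Vallejo,")
--     contenido.append("          Alcaldia Azcapotzalco, CDMX")
--     contenido.append("-------------------------------------")
--
--     for key, value in ticket_data.items():
--         contenido.append(f"{key} = {value}")
--     contenido.append("-------------------------------------")
--
--     registros_bebidas = [t for t in ticket_bebidas if t['producto'] == 'bebidas']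
--     registros_alimentos = [t for t in ticket_bebidas if t['producto'] == 'alimentos']
--     registros_promociones = [t for t in ticket_bebidas if t['producto'] == 'promociones']
--
--     def agregar_registro(contenido, titulo, registros):
--         if registros:
--             contenido.append(f"           {titulo}")
--             for i, ticket in enumerate(registros, start=1):
--                 contenido.append(f"      {titulo[:-1]} {i}")
--                 for key, value in ticket.items():
--                     contenido.append(f"{key} = {value}")
--             contenido.append("-------------------------------------")
--         else:
--             contenido.append(f"       No hay {titulo[:-1].lower()}s")
--             contenido.append("------------------------------------------------")
--
--     agregar_registro(contenido, "Registro de Bebidas", registros_bebidas)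
--     agregar_registro(contenido, "Registro de Alimentos", registros_alimentos)
--     agregar_registro(contenido, "Registro de Promociones", registros_promociones)
--
--     contenido.append(f"            TOTAL = {total} MXN")
--     contenido.append("-----------------------------------------------")
--     contenido.append(f"          Vendedor: Tory Cafe")
--     contenido.append(f"          Mesero: Tory Cafe")
--     contenido.append(f"          Gracias por su compra!")
--     contenido.append(f"          No hay devoluciones")
--
--     return "\n".join(contenido)
-- ===== SOURCE B (Python) =====
-- SEPARADOR_CORTO = "-------------------------------------"
-- SEPARADOR_LARGO = "------------------------------------------------"
--
-- ENCABEZADO = [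
--     "                  Tory Cafe",
--     "   Poniente 128 #505, Col. Industrial Vallejo,",
--     "          Alcaldia Azcapotzalco, CDMX",
--     SEPARADOR_CORTO,
-- ]
--
--
-- def _seccion(titulo, registros):
--     corto = titulo[:-1]
--     if not registros:
--         return ["       No hay " + corto.lower() + "s", SEPARADOR_LARGO]
--     return ([f"           {titulo}"]
--             + [linea
--                for i, t in enumerate(registros, 1)
--                for linea in [f"      {corto} {i}"] + [f"{k} = {v}" for k, v in t.items()]]
--             + [SEPARADOR_CORTO])
--
--
-- def generar_ticket_en_memoria(ticket_data, ticket_bebidas, total):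
--     grupos = {}
--     for t in ticket_bebidas:
--         grupos.setdefault(t['producto'], []).append(t)
--     partes = (ENCABEZADO
--               + [f"{k} = {v}" for k, v in ticket_data.items()]
--               + [SEPARADOR_CORTO]
--               + _seccion("Registro de Bebidas", grupos.get('bebidas', []))
--               + _seccion("Registro de Alimentos", grupos.get('alimentos', []))
--               + _seccion("Registro de Promociones", grupos.get('promociones', []))
--               + [f"            TOTAL = {total} MXN",
--                  "-----------------------------------------------",
--                  "          Vendedor: Tory Cafe",
--                  "          Mesero: Tory Cafe",
--                  "          Gracias por su compra!",
--                  "          No hay devoluciones"])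
--     return "\n".join(partes)
-- ===== Notes on version B (the rewrite author's own statement) =====
-- stated objective: alternative
-- what changed: B replaces A's three separate filter scans of ticket_bebidas with one grouping-dict pass (setdefault/append keyed by t['producto']) and rebuilds the ticket by pure list concatenation of a section helper that returns its lines, instead of A's mutating agregar_registro.
import Mathlib
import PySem

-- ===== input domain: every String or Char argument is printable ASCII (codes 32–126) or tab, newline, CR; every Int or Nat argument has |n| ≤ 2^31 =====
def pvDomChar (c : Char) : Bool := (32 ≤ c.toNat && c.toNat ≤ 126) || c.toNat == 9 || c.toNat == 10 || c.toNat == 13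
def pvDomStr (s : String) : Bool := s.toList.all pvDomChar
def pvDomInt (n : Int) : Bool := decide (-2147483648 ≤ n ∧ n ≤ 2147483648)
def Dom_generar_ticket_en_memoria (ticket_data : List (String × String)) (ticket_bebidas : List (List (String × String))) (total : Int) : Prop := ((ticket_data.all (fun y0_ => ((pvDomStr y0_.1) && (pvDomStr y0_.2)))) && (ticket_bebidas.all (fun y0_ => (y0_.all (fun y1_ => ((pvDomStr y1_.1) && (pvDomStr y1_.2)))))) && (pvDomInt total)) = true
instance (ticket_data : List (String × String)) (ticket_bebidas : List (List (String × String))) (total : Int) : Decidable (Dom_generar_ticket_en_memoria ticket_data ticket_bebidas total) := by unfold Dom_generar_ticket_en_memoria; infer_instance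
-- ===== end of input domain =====

-- B groups ticket_bebidas in a single dict pass instead of A's three filter scans, and assembles
-- the ticket by concatenating lists returned by a pure section helper instead of A's mutating helper.

-- ===== PORT A =====
-- t['producto'] : first-match dict lookup (Pre_ guarantees the key is present, so the "" default never fires)
def pvProducto (t : List (String × String)) : String :=
  PySem.Dict.getD (PySem.Dict.mk t) "producto" ""

-- the nested helper agregar_registro(contenido, titulo, registros): returns the extended contenido
def agregar_registro (contenido : List String) (titulo : String)
    (registros : List (List (String × String))) : List String :=
  if registros ≠ [] then
    let contenido := contenido ++ ["           " ++ titulo]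
    let contenido := (PySem.List.enumerate registros 1).foldl
      (fun acc it =>
        acc ++ (("      " ++ PySem.Str.slice titulo none (some (-1)) ++ " " ++ PySem.Int.toStr it.1)
                  :: it.2.map (fun kv => kv.1 ++ " = " ++ kv.2)))
      contenido
    contenido ++ ["-------------------------------------"]
  else
    contenido ++ ["       No hay " ++ PySem.Str.lower (PySem.Str.slice titulo none (some (-1))) ++ "s",
                  "------------------------------------------------"]

def generar_ticket_en_memoria (ticket_data : List (String × String)) (ticket_bebidas : List (List (String × String))) (total : Int) : String :=
  let contenido : List String :=
    ["                  Tory Cafe",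
     "   Poniente 128 #505, Col. Industrial Vallejo,",
     "          Alcaldia Azcapotzalco, CDMX",
     "-------------------------------------"]
  let contenido := contenido ++ ticket_data.map (fun kv => kv.1 ++ " = " ++ kv.2)
  let contenido := contenido ++ ["-------------------------------------"]
  let registros_bebidas := ticket_bebidas.filter (fun t => pvProducto t == "bebidas")
  let registros_alimentos := ticket_bebidas.filter (fun t => pvProducto t == "alimentos")
  let registros_promociones := ticket_bebidas.filter (fun t => pvProducto t == "promociones")
  let contenido := agregar_registro contenido "Registro de Bebidas" registros_bebidas
  let contenido := agregar_registro contenido "Registro de Alimentos" registros_alimentos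
  let contenido := agregar_registro contenido "Registro de Promociones" registros_promociones
  let contenido := contenido ++
    ["            TOTAL = " ++ PySem.Int.toStr total ++ " MXN",
     "-----------------------------------------------",
     "          Vendedor: Tory Cafe",
     "          Mesero: Tory Cafe",
     "          Gracias por su compra!",
     "          No hay devoluciones"]
  PySem.Str.join "\n" contenido

-- ===== PORT B =====
-- _seccion(titulo, registros): returns the lines of one section (no mutation)
def pvSeccion (titulo : String) (registros : List (List (String × String))) : List String :=
  let corto := PySem.Str.slice titulo none (some (-1))
  if registros = [] then
    ["       No hay " ++ PySem.Str.lower corto ++ "s",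
     "------------------------------------------------"]
  else
    ["           " ++ titulo]
    ++ (PySem.List.enumerate registros 1).flatMap
        (fun it => ("      " ++ corto ++ " " ++ PySem.Int.toStr it.1)
                     :: it.2.map (fun kv => kv.1 ++ " = " ++ kv.2))
    ++ ["-------------------------------------"]

def generar_ticket_en_memoria_alt (ticket_data : List (String × String)) (ticket_bebidas : List (List (String × String))) (total : Int) : String :=
  -- single grouping pass: grupos.setdefault(t['producto'], []).append(t)
  let grupos := ticket_bebidas.foldl
    (fun d t => PySem.Dict.modify d (pvProducto t) [] (· ++ [t]))
    PySem.Dict.empty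
  let partes : List String :=
    ["                  Tory Cafe",
     "   Poniente 128 #505, Col. Industrial Vallejo,",
     "          Alcaldia Azcapotzalco, CDMX",
     "-------------------------------------"]
    ++ ticket_data.map (fun kv => kv.1 ++ " = " ++ kv.2)
    ++ ["-------------------------------------"]
    ++ pvSeccion "Registro de Bebidas" (PySem.Dict.getD grupos "bebidas" [])
    ++ pvSeccion "Registro de Alimentos" (PySem.Dict.getD grupos "alimentos" [])
    ++ pvSeccion "Registro de Promociones" (PySem.Dict.getD grupos "promociones" [])
    ++ ["            TOTAL = " ++ PySem.Int.toStr total ++ " MXN",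
        "-----------------------------------------------",
        "          Vendedor: Tory Cafe",
        "          Mesero: Tory Cafe",
        "          Gracias por su compra!",
        "          No hay devoluciones"]
  PySem.Str.join "\n" partes

-- ===== PRECONDITION & SPEC =====
-- Pre_ excludes inputs where some element of ticket_bebidas lacks the key 'producto':
-- there A raises KeyError (t['producto']), and B raises the same KeyError.
def Pre_generar_ticket_en_memoria (ticket_data : List (String × String)) (ticket_bebidas : List (List (String × String))) (total : Int) : Prop :=
  ∀ t ∈ ticket_bebidas, "producto" ∈ t.map (·.1)
instance (ticket_data : List (String × String)) (ticket_bebidas : List (List (String × String))) (total : Int) : Decidable (Pre_generar_ticket_en_memoria ticket_data ticket_bebidas total) := by unfold Pre_generar_ticket_en_memoria; infer_instance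
def pvWitness_generar_ticket_en_memoria : (List (String × String)) × (List (List (String × String))) × Int :=
  ([("folio", "7")], [[("producto", "bebidas"), ("nombre", "cafe")]], 45)

def Spec_generar_ticket_en_memoria (ticket_data : List (String × String)) (ticket_bebidas : List (List (String × String))) (total : Int) (out : String) : Prop := out = generar_ticket_en_memoria_alt ticket_data ticket_bebidas total
instance (ticket_data : List (String × String)) (ticket_bebidas : List (List (String × String))) (total : Int) (out : String) : Decidable (Spec_generar_ticket_en_memoria ticket_data ticket_bebidas total out) := by unfold Spec_generar_ticket_en_memoria; infer_instance

-- ===== CLAIM (what is proved, stated in full; the proofs are below) =====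
def Claim_equal_generar_ticket_en_memoria : Prop := ∀ (ticket_data : List (String × String)) (ticket_bebidas : List (List (String × String))) (total : Int), Dom_generar_ticket_en_memoria ticket_data ticket_bebidas total → Pre_generar_ticket_en_memoria ticket_data ticket_bebidas total → Spec_generar_ticket_en_memoria ticket_data ticket_bebidas total (generar_ticket_en_memoria ticket_data ticket_bebidas total)

-- ===== LEMMAS AND PROOFS =====

-- the grouping loop indexed at key c yields exactly the filter A computes for c
theorem getD_group_eq_filter (l : List (List (String × String)))
    (d : PySem.Dict String (List (List (String × String)))) (c : String) :
    PySem.Dict.getD (l.foldl (fun d t => PySem.Dict.modify d (pvProducto t) [] (· ++ [t])) d) c []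
      = PySem.Dict.getD d c [] ++ l.filter (fun t => pvProducto t == c) := by
  induction l generalizing d with
  | nil => simp
  | cons t ts ih =>
    simp only [List.foldl_cons, ih, List.filter_cons, PySem.Dict.getD_modify]
    by_cases h : pvProducto t = c
    · simp [h]
    · simp [h, Ne.symm h, beq_iff_eq]

-- A's mutating helper = contenido ++ B's pure section
theorem agregar_eq_append_seccion (contenido : List String) (titulo : String)
    (registros : List (List (String × String))) :
    agregar_registro contenido titulo registros = contenido ++ pvSeccion titulo registros := by
  unfold agregar_registro pvSeccion
  by_cases h : registros = []
  · simp [h]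
  · simp only [h, ne_eq, not_false_iff, if_pos, PySem.List.foldl_append_eq_flatMap]
    simp [List.append_assoc]

theorem generar_ticket_en_memoria_spec' (ticket_data : List (String × String))
    (ticket_bebidas : List (List (String × String))) (total : Int) :
    generar_ticket_en_memoria ticket_data ticket_bebidas total
      = generar_ticket_en_memoria_alt ticket_data ticket_bebidas total := by
  unfold generar_ticket_en_memoria generar_ticket_en_memoria_alt
  simp only [agregar_eq_append_seccion, getD_group_eq_filter, PySem.Dict.getD_empty,
    List.nil_append, List.append_assoc]

-- ===== VERDICT (by name: the statement is the Claim_ definition above) =====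
theorem generar_ticket_en_memoria_spec : Claim_equal_generar_ticket_en_memoria := by
  intro ticket_data ticket_bebidas total _ _
  exact generar_ticket_en_memoria_spec' ticket_data ticket_bebidas total
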